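-- pv_equiv track=rewrite | github.com/DialloMamadouSaidou/condense | cours/fonction.py | disposition_liste
-- ===== SOURCE A (Python) =====
-- def key_dict(liste1):
--     liste1 = list(liste1)
--     return [key for item in liste1 for key in item.keys()]
--
-- def retrouve_element(element: str, liste_c: list):
--     """
--     Cette fonction permet de retrouver un element dune liste contenant
--     des dictionnaires d'élément.
--     Il reçoit la clé de lement puis retourne lelement au complète
--     liste = [{'exam1': 30}, {'exam2': 40}]
--     en donnant exam1 il retounera {'exam1': 30}
--     """
--     liste_t = key_dict(liste_c)
--
--     if element in liste_t:
--         c = liste_t.index(element)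
--         return liste_c[c]
--
-- def disposition_liste(liste_first, liste_second):
--     """
--     Cette fonction permet d'ordonner la deuxième liste
--     en fonction de la disposition de ma première liste
--     Utilité dans ma vue au niveau de la notation.
--     """
--     liste = []
--     liste1 = key_dict(liste_first)
--     liste2 = key_dict(liste_second)
--     mon_dico = {item: index for index, item in enumerate(liste1)}
--
--     liste2.sort(key=lambda x: mon_dico[x])
--
--     for item in liste2:
--         liste.append(retrouve_element(item, liste_second))
--     return liste
-- ===== SOURCE B (Python) =====
-- def disposition_liste(liste_first, liste_second):
--     # Bucket/counting distribution instead of comparison sort + repeated index rescans.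
--     order = {}
--     n = 0
--     for d in liste_first:
--         for key in d:
--             order[key] = n
--             n += 1
--     pos = {}
--     keys2 = []
--     for d in liste_second:
--         for key in d:
--             if key not in pos:
--                 pos[key] = len(keys2)
--             keys2.append(key)
--     buckets = [[] for _ in range(n)]
--     for key in keys2:
--         buckets[order[key]].append(liste_second[pos[key]])
--     return [d for b in buckets for d in b]
-- ===== Notes on version B (the rewrite author's own statement) =====
-- stated objective: faster
-- what changed: Replaces A's comparison sort of the keys plus a per-key retrouve_element rescan (rebuilding the flattened key list and calling .index for every key) with one-pass tables (order position per key, first-occurrence position per key) followed by a stable counting/bucket distribution and concatenation.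
import Mathlib
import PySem

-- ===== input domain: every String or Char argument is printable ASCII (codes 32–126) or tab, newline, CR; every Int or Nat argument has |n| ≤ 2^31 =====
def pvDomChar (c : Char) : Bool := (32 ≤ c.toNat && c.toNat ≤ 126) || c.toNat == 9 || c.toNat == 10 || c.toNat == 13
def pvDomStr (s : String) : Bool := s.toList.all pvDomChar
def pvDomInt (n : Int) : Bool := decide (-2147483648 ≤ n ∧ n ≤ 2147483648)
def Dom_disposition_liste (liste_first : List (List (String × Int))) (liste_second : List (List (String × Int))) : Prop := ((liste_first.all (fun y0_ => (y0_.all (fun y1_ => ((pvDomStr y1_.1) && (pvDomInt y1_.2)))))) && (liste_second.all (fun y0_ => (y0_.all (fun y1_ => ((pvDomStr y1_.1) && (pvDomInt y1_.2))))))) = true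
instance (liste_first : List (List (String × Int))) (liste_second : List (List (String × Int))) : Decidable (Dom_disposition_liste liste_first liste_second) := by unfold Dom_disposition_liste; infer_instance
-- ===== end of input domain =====

-- B replaces A's comparison sort of the keys plus per-key index rescans with one-pass
-- order/first-dict tables and a stable bucket (counting) distribution.

-- ===== PORT A =====
-- key_dict: [key for item in liste1 for key in item.keys()]
def pvKeyDict (liste1 : List (List (String × Int))) : List String :=
  liste1.flatMap (fun item => item.map (fun kv => kv.1))

-- retrouve_element: returns None (none) when the key is absent; liste_c[c] via pyGet? (none = IndexError)
def pvRetrouveElement (element : String) (liste_c : List (List (String × Int))) : Option (List (String × Int)) :=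
  let liste_t := pvKeyDict liste_c
  if element ∈ liste_t then
    match PySem.List.index? liste_t element with
    | some c => PySem.List.pyGet? liste_c (c : Int)
    | none => none
  else none

def disposition_liste (liste_first : List (List (String × Int))) (liste_second : List (List (String × Int))) : List (List (String × Int)) :=
  let liste1 := pvKeyDict liste_first
  let liste2 := pvKeyDict liste_second
  let mon_dico : PySem.Dict String Int :=
    (PySem.List.enumerate liste1).foldl (fun d q => d.insert q.2 q.1) PySem.Dict.empty
  -- liste2.sort(key=lambda x: mon_dico[x]); Pre_ guarantees every key is present, so getD's default is unreachable
  let liste2s := PySem.List.sorted liste2 (fun x => mon_dico.getD x 0)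
  -- for item in liste2s: liste.append(retrouve_element(item, liste_second)); under Pre_ the Option is always some
  liste2s.foldl (fun acc item => acc ++ [(pvRetrouveElement item liste_second).getD []]) []

-- ===== PORT B =====
def disposition_liste_alt (liste_first : List (List (String × Int))) (liste_second : List (List (String × Int))) : List (List (String × Int)) :=
  -- order[key] = running flat position n (last occurrence wins)
  let on : PySem.Dict String Int × Int :=
    liste_first.foldl (fun p d => d.foldl (fun q kv => (q.1.insert kv.1 q.2, q.2 + 1)) p) (PySem.Dict.empty, 0)
  let order := on.1
  let n := on.2
  -- one pass over liste_second: keys2 in order, pos[key] = first-occurrence flat position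
  let pk : PySem.Dict String Int × List String :=
    liste_second.foldl (fun p d => d.foldl (fun q kv =>
      (if q.1.contains kv.1 then q.1 else q.1.insert kv.1 (q.2.length : Int), q.2 ++ [kv.1])) p)
      (PySem.Dict.empty, [])
  let pos := pk.1
  let keys2 := pk.2
  -- bucket distribution; Pre_ guarantees order[key] exists and liste_second[pos[key]] is in range,
  -- so the getD defaults are unreachable
  let buckets := keys2.foldl
    (fun bs k => bs.modify ((order.getD k 0).toNat)
      (fun b => b ++ [(PySem.List.pyGet? liste_second (pos.getD k 0)).getD []]))
    (List.replicate n.toNat [])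
  buckets.flatten

-- ===== PRECONDITION & SPEC =====
-- Exactly the inputs on which A returns normally: every flattened key of liste_second occurs among
-- liste_first's flattened keys (else mon_dico[x] raises KeyError), and each key's first-occurrence
-- position in the flattened key list is a valid index into liste_second (else liste_c[c] raises IndexError).
def Pre_disposition_liste (liste_first : List (List (String × Int))) (liste_second : List (List (String × Int))) : Prop :=
  ∀ d ∈ liste_second, ∀ kv ∈ d,
    kv.1 ∈ liste_first.flatMap (fun item => item.map (fun p => p.1)) ∧
    List.idxOf kv.1 (liste_second.flatMap (fun item => item.map (fun p => p.1))) < liste_second.length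
instance (liste_first : List (List (String × Int))) (liste_second : List (List (String × Int))) : Decidable (Pre_disposition_liste liste_first liste_second) := by unfold Pre_disposition_liste; infer_instance

def pvWitness_disposition_liste : (List (List (String × Int))) × (List (List (String × Int))) :=
  ([[("a", 1)], [("b", 2)], [("c", 3)]], [[("c", 9)], [("a", 8)], [("c", 7)]])

def Spec_disposition_liste (liste_first : List (List (String × Int))) (liste_second : List (List (String × Int))) (out : List (List (String × Int))) : Prop := out = disposition_liste_alt liste_first liste_second
instance (liste_first : List (List (String × Int))) (liste_second : List (List (String × Int))) (out : List (List (String × Int))) : Decidable (Spec_disposition_liste liste_first liste_second out) := by unfold Spec_disposition_liste; infer_instance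

-- ===== CLAIM (what is proved, stated in full; the proofs are below) =====
def Claim_equal_disposition_liste : Prop := ∀ (liste_first : List (List (String × Int))) (liste_second : List (List (String × Int))), Dom_disposition_liste liste_first liste_second → Pre_disposition_liste liste_first liste_second → Spec_disposition_liste liste_first liste_second (disposition_liste liste_first liste_second)

-- ===== LEMMAS AND PROOFS =====

-- the enumerate-fold dictionary (A's mon_dico, started at s from d0)
def pvMdic (xs : List String) (s : Int) (d0 : PySem.Dict String Int) : PySem.Dict String Int :=
  (PySem.List.enumerate xs s).foldl (fun d q => d.insert q.2 q.1) d0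

lemma pvKeyDict_cons (d : List (String × Int)) (ds : List (List (String × Int))) :
    pvKeyDict (d :: ds) = d.map (fun kv => kv.1) ++ pvKeyDict ds := by
  simp [pvKeyDict]

lemma pvOrder_inner (kvs : List (String × Int)) (p : PySem.Dict String Int × Int) :
    kvs.foldl (fun q kv => (q.1.insert kv.1 q.2, q.2 + 1)) p
      = (pvMdic (kvs.map (fun kv => kv.1)) p.2 p.1, p.2 + kvs.length) := by
  induction kvs generalizing p with
  | nil => simp [pvMdic, PySem.List.enumerate_nil]
  | cons kv kvs ih =>
      rw [List.foldl_cons, ih]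
      simp [pvMdic, PySem.List.enumerate_cons]
      omega

lemma pvMdic_append (xs ys : List String) (s : Int) (d0 : PySem.Dict String Int) :
    pvMdic (xs ++ ys) s d0 = pvMdic ys (s + xs.length) (pvMdic xs s d0) := by
  simp [pvMdic, PySem.List.enumerate_append, List.foldl_append]

-- B's order fold equals A's mon_dico fold, with the counter = number of flattened keys
lemma pvOrder_eq (ds : List (List (String × Int))) (p : PySem.Dict String Int × Int) :
    ds.foldl (fun p d => d.foldl (fun q kv => (q.1.insert kv.1 q.2, q.2 + 1)) p) p
      = (pvMdic (pvKeyDict ds) p.2 p.1, p.2 + (pvKeyDict ds).length) := by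
  induction ds generalizing p with
  | nil => simp [pvKeyDict, pvMdic, PySem.List.enumerate_nil]
  | cons d ds ih =>
      rw [List.foldl_cons, pvOrder_inner, ih, pvKeyDict_cons, pvMdic_append]
      simp [add_assoc]

lemma pvMdic_bound (xs : List String) (k : String) (hk : k ∈ xs) :
    0 ≤ (pvMdic xs 0 PySem.Dict.empty).getD k 0 ∧ (pvMdic xs 0 PySem.Dict.empty).getD k 0 < xs.length := by
  induction xs using List.reverseRecOn with
  | nil => simp at hk
  | append_singleton xs a ih =>
      rw [pvMdic_append]
      simp [pvMdic, PySem.List.enumerate_cons, PySem.List.enumerate_nil]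
      rw [PySem.Dict.getD_insert]
      by_cases hka : k = a
      · simp [hka]
      · simp [hka]
        have hk' : k ∈ xs := by
          rcases List.mem_append.mp hk with h | h
          · exact h
          · simp at h; exact absurd h hka
        have := ih hk'
        simp only [pvMdic] at this
        omega

-- B's pos/keys2 nested fold only looks at the keys: it equals the flat fold over the flattened keys
lemma pvPos_inner (kvs : List (String × Int)) (p : PySem.Dict String Int × List String) :
    kvs.foldl (fun q kv =>
        (if q.1.contains kv.1 then q.1 else q.1.insert kv.1 (q.2.length : Int), q.2 ++ [kv.1])) p
      = (kvs.map (fun kv => kv.1)).foldl (fun q k =>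
        (if q.1.contains k then q.1 else q.1.insert k (q.2.length : Int), q.2 ++ [k])) p := by
  rw [List.foldl_map]

lemma pvPos_nested (s : List (List (String × Int))) (p : PySem.Dict String Int × List String) :
    s.foldl (fun p d => d.foldl (fun q kv =>
        (if q.1.contains kv.1 then q.1 else q.1.insert kv.1 (q.2.length : Int), q.2 ++ [kv.1])) p) p
      = (pvKeyDict s).foldl (fun q k =>
        (if q.1.contains k then q.1 else q.1.insert k (q.2.length : Int), q.2 ++ [k])) p := by
  induction s generalizing p with
  | nil => simp [pvKeyDict]
  | cons d ds ih =>
      rw [List.foldl_cons, pvPos_inner, ih, pvKeyDict_cons, List.foldl_append]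

-- the flat fold records each key's first-occurrence position and the key list itself
lemma pvPos_spec (ks : List String) : ∀ (D0 : PySem.Dict String Int) (K0 : List String),
    (∀ k, ((ks.foldl (fun q k => (if q.1.contains k then q.1 else q.1.insert k (q.2.length : Int),
          q.2 ++ [k])) (D0, K0)).1).get? k
        = (D0.get? k).or ((PySem.List.index? ks k).map (fun c => ((K0.length + c : Nat) : Int)))) ∧
    (ks.foldl (fun q k => (if q.1.contains k then q.1 else q.1.insert k (q.2.length : Int),
        q.2 ++ [k])) (D0, K0)).2 = K0 ++ ks := by
  induction ks with
  | nil =>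
      intro D0 K0
      constructor
      · intro k
        rw [PySem.List.index?_eq_idxOf?]
        simp
      · simp
  | cons k0 ks ih =>
      intro D0 K0
      rw [List.foldl_cons]
      simp only []
      obtain ⟨ihd, ihk⟩ := ih
        (if D0.contains k0 then D0 else D0.insert k0 (K0.length : Int)) (K0 ++ [k0])
      constructor
      · intro k
        rw [ihd k]
        by_cases hkk : k = k0
        · subst hkk
          rw [PySem.List.index?_cons_self]
          by_cases hc : D0.contains k = true
          · rw [if_pos hc]
            rw [PySem.Dict.contains_eq_isSome_get?] at hc
            obtain ⟨v, hv⟩ := Option.isSome_iff_exists.mp hc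
            simp [hv, Option.or]
          · rw [if_neg hc]
            rw [PySem.Dict.contains_eq_isSome_get?] at hc
            have hnone : D0.get? k = none := Option.not_isSome_iff_eq_none.mp (by simpa using hc)
            rw [PySem.Dict.get?_insert]
            simp [hnone, Option.or]
        · rw [PySem.List.index?_cons_of_ne _ (fun h => hkk h.symm)]
          have hget : (if D0.contains k0 = true then D0 else D0.insert k0 (K0.length : Int)).get? k
              = D0.get? k := by
            by_cases hc : D0.contains k0 = true
            · rw [if_pos hc]
            · rw [if_neg hc, PySem.Dict.get?_insert, if_neg hkk]
          rw [hget]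
          cases hix : PySem.List.index? ks k with
          | none => simp
          | some c =>
              simp only [Option.map_some, List.length_append, List.length_cons, List.length_nil]
              have : (K0.length + 1 + c : Nat) = (K0.length + (c + 1) : Nat) := by omega
              rw [this]
      · rw [ihk]
        simp

-- A's retrouve_element, once the key is known present at flat index c
lemma pvRetrouve_idx (s : List (List (String × Int))) (k : String) (hk : k ∈ pvKeyDict s)
    (c : Nat) (hc : PySem.List.index? (pvKeyDict s) k = some c) :
    pvRetrouveElement k s = PySem.List.pyGet? s (c : Int) := by
  simp only [pvRetrouveElement]
  rw [if_pos hk, hc]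

-- inserting x before a suffix that all compares after x skips exactly the prefix
lemma pvInsertBy_split {α : Type} (before : α → α → Bool) (x : α) (P Q : List α)
    (hQ : ∀ y ∈ Q, before x y = true) :
    PySem.List.insertBy before x (P ++ Q) = PySem.List.insertBy before x P ++ Q := by
  induction P with
  | nil =>
      cases Q with
      | nil => simp
      | cons q Q' =>
          simp only [List.nil_append]
          rw [show PySem.List.insertBy before x (q :: Q') = x :: q :: Q' by
            simp [PySem.List.insertBy, hQ q (by simp)]]
          simp [PySem.List.insertBy]
  | cons p P' ih =>
      by_cases hp : before x p = true
      · simp [PySem.List.insertBy, hp]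
      · simp only [List.cons_append]
        rw [show PySem.List.insertBy before x (p :: (P' ++ Q))
              = p :: PySem.List.insertBy before x (P' ++ Q) by
            simp [PySem.List.insertBy, hp]]
        rw [show PySem.List.insertBy before x (p :: P') = p :: PySem.List.insertBy before x P' by
            simp [PySem.List.insertBy, hp]]
        rw [ih]
        simp

lemma pvBucket_mem {key : String → Int} {n : Nat} {xs : List String} {y : String}
    (hy : y ∈ ((List.range n).map (fun (i : Nat) => xs.filter (fun z => key z = (i : Int)))).flatten) :
    ∃ i : Nat, i < n ∧ key y = (i : Int) := by
  rcases List.mem_flatten.mp hy with ⟨b, hb, hyb⟩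
  rcases List.mem_map.mp hb with ⟨i, hi, rfl⟩
  exact ⟨i, List.mem_range.mp hi, by simpa using (List.mem_filter.mp hyb).2⟩

-- inserting x into the bucket concatenation appends it at the end of its own bucket
lemma pvInsert_buckets (key : String → Int) (x : String) (xs : List String) (n : Nat)
    (hx0 : 0 ≤ key x) (hxn : key x < n) :
    PySem.List.insertBy (fun a b => decide (key a < key b)) x
        (((List.range n).map (fun (i : Nat) => xs.filter (fun y => key y = (i : Int)))).flatten)
      = ((List.range n).map (fun (i : Nat) => (xs ++ [x]).filter (fun y => key y = (i : Int)))).flatten := by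
  induction n with
  | zero => omega
  | succ n ih =>
      rw [List.range_succ]
      simp only [List.map_append, List.map_cons, List.map_nil, List.flatten_append,
        List.flatten_cons, List.flatten_nil, List.append_nil]
      by_cases hx : key x = (n : Int)
      · -- x belongs to the last bucket: everything present compares ≤ x, so it is appended
        have hall : ∀ y ∈ (((List.range n).map (fun (i : Nat) => xs.filter (fun y => key y = (i : Int)))).flatten
            ++ xs.filter (fun y => key y = (n : Int))),
            (fun a b => decide (key a < key b)) x y = false := by
          intro y hy
          rcases List.mem_append.mp hy with h | h
          · obtain ⟨i, hi, hkey⟩ := pvBucket_mem h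
            simp only [decide_eq_false_iff_not, not_lt]
            rw [hkey, hx]
            exact_mod_cast Nat.le_of_lt hi
          · have := (List.mem_filter.mp h).2
            simp only [decide_eq_true_eq] at this
            simp [this, hx]
        rw [PySem.List.insertBy_of_forall_not_before _ _ _ hall]
        have hfront : ∀ i : Nat, i < n →
            (xs ++ [x]).filter (fun y => key y = (i : Int)) = xs.filter (fun y => key y = (i : Int)) := by
          intro i hi
          rw [List.filter_append]
          have hne : ¬ (key x = (i : Int)) := by
            rw [hx]; exact_mod_cast Nat.ne_of_gt hi
          simp [List.filter, hne]
        have : ((List.range n).map (fun (i : Nat) => (xs ++ [x]).filter (fun y => key y = (i : Int))))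
             = ((List.range n).map (fun (i : Nat) => xs.filter (fun y => key y = (i : Int)))) := by
          apply List.map_congr_left
          intro i hi
          exact hfront i (List.mem_range.mp hi)
        rw [this, List.filter_append]
        simp [List.filter, hx]
      · -- x belongs to an earlier bucket: skip over the final bucket and recurse
        have hQ : ∀ y ∈ xs.filter (fun y => decide (key y = (n : Int))),
            (fun a b => decide (key a < key b)) x y = true := by
          intro y hy
          have := (List.mem_filter.mp hy).2
          simp only [decide_eq_true_eq] at this ⊢
          omega
        rw [pvInsertBy_split _ _ _ _ hQ]
        rw [ih (by omega)]
        have : (xs ++ [x]).filter (fun y => key y = (n : Int)) = xs.filter (fun y => key y = (n : Int)) := by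
          rw [List.filter_append]
          have : [x].filter (fun y => decide (key y = (n : Int))) = [] := by
            simp [List.filter, hx]
          simp [this]
        rw [this]

lemma pvSorted_buckets (key : String → Int) (n : Nat) (xs : List String)
    (h : ∀ x ∈ xs, 0 ≤ key x ∧ key x < n) :
    PySem.List.sorted xs key
      = ((List.range n).map (fun (i : Nat) => xs.filter (fun y => key y = (i : Int)))).flatten := by
  induction xs using List.reverseRecOn with
  | nil =>
      rw [PySem.List.sorted_eq_foldl_insertBy]
      simp only [List.foldl_nil, List.filter_nil]
      refine (List.flatten_eq_nil_iff.mpr ?_).symm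
      intro l hl
      rcases List.mem_map.mp hl with ⟨i, _, rfl⟩
      rfl
  | append_singleton xs x ih =>
      have hx := h x (by simp)
      have hxs : ∀ y ∈ xs, 0 ≤ key y ∧ key y < n := fun y hy => h y (by simp [hy])
      rw [PySem.List.sorted_eq_foldl_insertBy, List.foldl_append, List.foldl_cons, List.foldl_nil,
        ← PySem.List.sorted_eq_foldl_insertBy, ih hxs,
        pvInsert_buckets key x xs n hx.1 hx.2]

lemma pvBucketFold_getElem? (j : String → Nat) (g : String → List (String × Int)) (ks : List String) :
    ∀ (bs : List (List (List (String × Int)))) (i : Nat),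
      (ks.foldl (fun bs k => bs.modify (j k) (fun b => b ++ [g k])) bs)[i]?
        = bs[i]?.map (fun b => b ++ (ks.filter (fun k => j k = i)).map g) := by
  induction ks with
  | nil =>
      intro bs i
      simp
  | cons k0 ks ih =>
      intro bs i
      rw [List.foldl_cons, ih, List.getElem?_modify]
      cases hbs : bs[i]? with
      | none => simp
      | some b =>
          by_cases hji : j k0 = i
          · simp [hji, List.append_assoc]
          · simp [hji]

lemma pvBucketFold_eq (j : String → Nat) (g : String → List (String × Int)) (ks : List String)
    (n : Nat) (_h : ∀ k ∈ ks, j k < n) :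
    ks.foldl (fun bs k => bs.modify (j k) (fun b => b ++ [g k])) (List.replicate n [])
      = (List.range n).map (fun i => (ks.filter (fun k => j k = i)).map g) := by
  apply List.ext_getElem?
  intro i
  rw [pvBucketFold_getElem? j g ks _ i]
  by_cases hi : i < n
  · simp [hi]
  · simp [hi]

-- ===== VERDICT (by name: the statement is the Claim_ definition above) =====
theorem disposition_liste_spec : Claim_equal_disposition_liste := by
  intro f s _ hpre
  show disposition_liste f s = disposition_liste_alt f s
  have hmem : ∀ k ∈ pvKeyDict s, k ∈ pvKeyDict f := by
    intro k hk
    simp only [pvKeyDict, List.mem_flatMap, List.mem_map] at hk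
    obtain ⟨d, hd, kv, hkv, rfl⟩ := hk
    exact (hpre d hd kv hkv).1
  have hb : ∀ k ∈ pvKeyDict s, 0 ≤ (pvMdic (pvKeyDict f) 0 PySem.Dict.empty).getD k 0 ∧
      (pvMdic (pvKeyDict f) 0 PySem.Dict.empty).getD k 0 < (pvKeyDict f).length :=
    fun k hk => pvMdic_bound (pvKeyDict f) k (hmem k hk)
  obtain ⟨hPd, hPk⟩ := pvPos_spec (pvKeyDict s) PySem.Dict.empty []
  simp only [disposition_liste, disposition_liste_alt]
  rw [pvOrder_eq f (PySem.Dict.empty, 0)]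
  simp only [pvPos_nested]
  rw [hPk]
  simp only [List.nil_append]
  rw [PySem.List.foldl_append_singleton_eq_map]
  simp only [List.nil_append]
  -- convert A's inlined mon_dico fold to its pvMdic name (definitional)
  have hA : (List.foldl (fun (d : PySem.Dict String Int) (q : Int × String) => d.insert q.2 q.1)
      PySem.Dict.empty (PySem.List.enumerate (pvKeyDict f))) = pvMdic (pvKeyDict f) 0 PySem.Dict.empty := rfl
  simp only [hA, zero_add, Int.toNat_natCast]
  -- A side: replace retrouve_element by the pos-table retrieval B performs
  rw [List.map_congr_left
      (g := fun k => (PySem.List.pyGet? s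
        (((pvKeyDict s).foldl (fun q k => (if q.1.contains k then q.1 else q.1.insert k (q.2.length : Int),
            q.2 ++ [k])) (PySem.Dict.empty, [])).1.getD k 0)).getD [])
      (fun k hk => by
        have hk2 : k ∈ pvKeyDict s := (PySem.List.mem_sorted _ _ _ _).mp hk
        obtain ⟨c, hc⟩ := Option.isSome_iff_exists.mp ((PySem.List.index?_isSome_iff _ _).mpr hk2)
        rw [pvRetrouve_idx s k hk2 c hc]
        simp only [PySem.Dict.getD_eq_get?_getD, hPd k, hc]
        simp [Option.or])]
  rw [pvSorted_buckets (fun x => (pvMdic (pvKeyDict f) 0 PySem.Dict.empty).getD x 0)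
        (pvKeyDict f).length (pvKeyDict s) hb]
  rw [List.map_flatten, List.map_map]
  -- B side: bucket fold to filters
  rw [pvBucketFold_eq _ _ _ _
        (fun k hk => by
          have := hb k hk
          omega)]
  -- bucket-by-bucket agreement: the filters test the same condition on members
  congr 1
  apply List.map_congr_left
  intro i hi
  simp only [Function.comp_apply]
  have hfil : (pvKeyDict s).filter
        (fun y => decide ((pvMdic (pvKeyDict f) 0 PySem.Dict.empty).getD y 0 = (i : Int)))
      = (pvKeyDict s).filter
        (fun k => decide (((pvMdic (pvKeyDict f) 0 PySem.Dict.empty).getD k 0).toNat = i)) := by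
    apply List.filter_congr
    intro k hk
    have := hb k hk
    simp only [decide_eq_decide]
    omega
  rw [hfil]
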